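-- pv_equiv track=rewrite | github.com/Eddie02582/CodeWars | Kata 5/Directions Reduction/Directions Reduction.py | dirReduc
-- ===== SOURCE A (Python) =====
-- def dirReduc(arr):
--     opposite={'EAST':'WEST','WEST':'EAST','NORTH':'SOUTH','SOUTH':'NORTH'}
--     new_plan = []
--     for d in arr:
--         if new_plan and new_plan[-1] == opposite[d]:
--             new_plan.pop()
--         else:
--             new_plan.append(d)
--     return new_plan
-- ===== SOURCE B (Python) =====
-- def dirReduc(arr):
--     opposite = {'EAST': 'WEST', 'WEST': 'EAST', 'NORTH': 'SOUTH', 'SOUTH': 'NORTH'}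
--     plan = list(arr)
--     changed = True
--     while changed:
--         changed = False
--         i = 0
--         while i + 1 < len(plan):
--             if plan[i + 1] == opposite[plan[i]]:
--                 del plan[i:i + 2]
--                 changed = True
--             else:
--                 i += 1
--     return plan
-- ===== Notes on version B (the rewrite author's own statement) =====
-- stated objective: alternative
-- what changed: Replaces A's single-pass last-in stack with iterated in-place adjacent-opposite-pair elimination (rescan until a pass makes no deletion); Pre_ excludes lists containing a non-direction token, on which A raises KeyError whenever its stack is nonempty and otherwise returns a value only by accidentally skipping the lookup.
-- outside the precondition, e.g. on dirReduc(['XX']): A returns ['XX'], B returns ['XX']; on dirReduc(['XX', 'NORTH']): A returns ['XX', 'NORTH'], B raises KeyError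
import Mathlib
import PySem

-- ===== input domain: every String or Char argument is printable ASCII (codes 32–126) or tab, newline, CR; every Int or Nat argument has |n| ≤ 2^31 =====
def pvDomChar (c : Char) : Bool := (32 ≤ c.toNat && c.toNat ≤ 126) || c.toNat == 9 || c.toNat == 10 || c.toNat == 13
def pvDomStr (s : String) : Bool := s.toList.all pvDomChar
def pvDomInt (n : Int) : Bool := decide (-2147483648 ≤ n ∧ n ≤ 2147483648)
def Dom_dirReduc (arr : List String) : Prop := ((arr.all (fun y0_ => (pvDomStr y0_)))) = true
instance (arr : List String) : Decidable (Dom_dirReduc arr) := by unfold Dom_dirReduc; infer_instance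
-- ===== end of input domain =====

-- B replaces A's single-pass stack with iterated adjacent-opposite-pair elimination until a
-- fixpoint (objective: alternative algorithm of similar size; not claimed faster).

-- ===== PORT A =====
def oppDict : PySem.Dict String String :=
  PySem.Dict.ofList [("EAST", "WEST"), ("WEST", "EAST"), ("NORTH", "SOUTH"), ("SOUTH", "NORTH")]

-- opposite[d]; the KeyError case (d not a key) is excluded by Pre_dirReduc, so the default is never hit there
def oppD (d : String) : String := (PySem.Dict.get? oppDict d).getD ""

-- one iteration of A's for-body; new_plan is kept reversed (append/pop at the head), reversed once at the end
def stepA (newPlan : List String) (d : String) : List String :=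
  match newPlan with
  | t :: ts => if t = oppD d then ts else d :: t :: ts
  | [] => [d]

def dirReduc (arr : List String) : List String :=
  (arr.foldl stepA []).reverse

-- ===== PORT B =====
-- Source B's inner while-loop: one left-to-right scan deleting adjacent opposite pairs in place
-- (after a deletion the scan continues at the same index); returns the scanned list and the 'changed' flag
def onePass : List String → List String × Bool
  | [] => ([], false)
  | [a] => ([a], false)
  | a :: b :: t =>
    if b = oppD a then ((onePass t).1, true)
    else
      let r := onePass (b :: t)
      (a :: r.1, r.2)

theorem onePass_length (l : List String) :
    (onePass l).1.length ≤ l.length ∧ ((onePass l).2 = true → (onePass l).1.length < l.length) := by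
  induction l using onePass.induct with
  | case1 => simp [onePass]
  | case2 a => simp [onePass]
  | case3 a t ih =>
    obtain ⟨h1, h2⟩ := ih
    rw [show onePass (a :: oppD a :: t) = ((onePass t).1, true) from by simp [onePass]]
    simp only [List.length_cons]
    exact ⟨by omega, fun _ => by omega⟩
  | case4 a b t h ih =>
    obtain ⟨h1, h2⟩ := ih
    simp only [onePass, if_neg h, List.length_cons] at h1 h2 ⊢
    exact ⟨by omega, fun hc => by have := h2 hc; omega⟩

-- Source B's outer while-changed loop
def loopB (l : List String) : List String :=
  let r := onePass l
  if h : r.2 = true then loopB r.1 else r.1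
termination_by l.length
decreasing_by exact (onePass_length l).2 h

def dirReduc_alt (arr : List String) : List String :=
  loopB arr

-- ===== PRECONDITION & SPEC =====
-- Pre_ excludes lists containing a non-direction token: on those A raises KeyError whenever its
-- stack is nonempty at that token (and otherwise returns a value only by accidentally skipping
-- the lookup), and B raises KeyError whenever the token still has a right neighbour in some pass.
def Pre_dirReduc (arr : List String) : Prop :=
  ∀ d ∈ arr, d ∈ (["NORTH", "SOUTH", "EAST", "WEST"] : List String)
instance (arr : List String) : Decidable (Pre_dirReduc arr) := by unfold Pre_dirReduc; infer_instance

def pvWitness_dirReduc : List String := ["NORTH", "SOUTH", "SOUTH", "EAST", "WEST", "NORTH", "WEST"]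

def Spec_dirReduc (arr : List String) (out : List String) : Prop := out = dirReduc_alt arr
instance (arr : List String) (out : List String) : Decidable (Spec_dirReduc arr out) := by unfold Spec_dirReduc; infer_instance

-- ===== CLAIM (what is proved, stated in full; the proofs are below) =====
def Claim_equal_dirReduc : Prop := ∀ (arr : List String), Dom_dirReduc arr → Pre_dirReduc arr → Spec_dirReduc arr (dirReduc arr)

-- ===== LEMMAS AND PROOFS =====

-- a stack/list with no adjacent opposite pair
def Reduced (l : List String) : Prop := List.IsChain (fun p q => q ≠ oppD p) l

theorem opp_opp {d : String} (h : d ∈ (["NORTH", "SOUTH", "EAST", "WEST"] : List String)) :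
    oppD (oppD d) = d := by
  simp only [List.mem_cons, List.not_mem_nil, or_false] at h
  rcases h with rfl | rfl | rfl | rfl <;> decide

theorem opp_ne_symm {d d' : String} (hd' : d' ∈ (["NORTH", "SOUTH", "EAST", "WEST"] : List String))
    (h : d' ≠ oppD d) : d ≠ oppD d' := by
  intro he
  exact h (by rw [he, opp_opp hd'])

theorem step_cancel {a : String} (ha : a ∈ (["NORTH", "SOUTH", "EAST", "WEST"] : List String))
    {st : List String} (hst : Reduced st) : stepA (stepA st a) (oppD a) = st := by
  cases st with
  | nil => simp [stepA, opp_opp ha]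
  | cons x xs =>
    by_cases hx : x = oppD a
    · subst hx
      cases xs with
      | nil => simp [stepA]
      | cons y ys =>
        have hy : y ≠ oppD (oppD a) := (List.isChain_cons_cons.mp hst).1
        rw [opp_opp ha] at hy
        simp [stepA, opp_opp ha, hy]
    · simp [stepA, hx, opp_opp ha]

theorem reduced_step {st : List String} (hst : Reduced st) (a : String) : Reduced (stepA st a) := by
  cases st with
  | nil => simp [stepA, Reduced]
  | cons x xs =>
    by_cases hx : x = oppD a
    · simp only [stepA, if_pos hx]
      exact hst.tail
    · simp only [stepA, if_neg hx]
      exact List.isChain_cons_cons.mpr ⟨hx, hst⟩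

theorem fold_onePass (l : List String) :
    ∀ st : List String, (∀ d ∈ l, d ∈ (["NORTH", "SOUTH", "EAST", "WEST"] : List String)) →
      Reduced st → List.foldl stepA st (onePass l).1 = List.foldl stepA st l := by
  induction l using onePass.induct with
  | case1 => intro st _ _; rfl
  | case2 a => intro st _ _; rfl
  | case3 a t ih =>
    intro st hv hst
    have ha : a ∈ (["NORTH", "SOUTH", "EAST", "WEST"] : List String) := hv a (by simp)
    simp only [onePass, List.foldl_cons]
    rw [step_cancel ha hst]
    exact ih st (fun d hd => hv d (by simp [hd])) hst
  | case4 a b t h ih =>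
    intro st hv hst
    simp only [onePass, if_neg h, List.foldl_cons]
    exact ih (stepA st a) (fun d hd => hv d (by simp [List.mem_cons] at hd ⊢; tauto))
      (reduced_step hst a)

theorem onePass_mem {l : List String} : ∀ x ∈ (onePass l).1, x ∈ l := by
  induction l using onePass.induct with
  | case1 => simp [onePass]
  | case2 a => simp [onePass]
  | case3 a t ih =>
    simp only [onePass]
    intro x hx
    simp [List.mem_cons, ih x hx]
  | case4 a b t h ih =>
    simp only [onePass, if_neg h]
    intro x hx
    rcases List.mem_cons.mp hx with rfl | hx
    · simp
    · exact List.mem_cons.mpr (Or.inr (ih x hx))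

theorem onePass_fix {l : List String} (h : (onePass l).2 = false) :
    (onePass l).1 = l ∧ Reduced l := by
  induction l using onePass.induct with
  | case1 => exact ⟨rfl, by simp [Reduced]⟩
  | case2 a => exact ⟨rfl, by simp [Reduced]⟩
  | case3 a t ih => simp [onePass] at h
  | case4 a b t hb ih =>
    simp only [onePass, if_neg hb] at h ⊢
    obtain ⟨h1, h2⟩ := ih h
    exact ⟨by rw [h1], List.isChain_cons_cons.mpr ⟨hb, h2⟩⟩

theorem fold_reduced (l : List String) :
    ∀ st : List String, (∀ d ∈ l, d ∈ (["NORTH", "SOUTH", "EAST", "WEST"] : List String)) →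
      Reduced l → (∀ x ∈ st.head?, ∀ d ∈ l.head?, x ≠ oppD d) →
      List.foldl stepA st l = l.reverse ++ st := by
  induction l with
  | nil => intro st _ _ _; simp
  | cons d t ih =>
    intro st hv hr hhead
    have hpush : stepA st d = d :: st := by
      cases st with
      | nil => rfl
      | cons x xs =>
        have : x ≠ oppD d := hhead x (by simp) d (by simp)
        simp [stepA, this]
    have hcond : ∀ x ∈ (d :: st).head?, ∀ e ∈ t.head?, x ≠ oppD e := by
      intro x hx e he
      cases t with
      | nil => simp at he
      | cons e' t' =>
        simp only [List.head?_cons, Option.mem_def, Option.some.injEq] at hx he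
        subst hx; subst he
        have h1 : e' ≠ oppD d := (List.isChain_cons_cons.mp hr).1
        exact opp_ne_symm (hv e' (by simp)) h1
    rw [List.foldl_cons, hpush, ih (d :: st) (fun e he => hv e (by simp [he])) hr.tail hcond]
    simp

theorem loopB_spec (n : ℕ) : ∀ l : List String, l.length ≤ n →
    (∀ d ∈ l, d ∈ (["NORTH", "SOUTH", "EAST", "WEST"] : List String)) →
    List.foldl stepA [] (loopB l) = List.foldl stepA [] l ∧
      (∀ d ∈ loopB l, d ∈ (["NORTH", "SOUTH", "EAST", "WEST"] : List String)) ∧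
      Reduced (loopB l) := by
  induction n with
  | zero =>
    intro l hl hv
    obtain rfl : l = [] := by cases l with | nil => rfl | cons a t => simp at hl
    rw [loopB]
    exact ⟨rfl, by simp [onePass], by simp [onePass, Reduced]⟩
  | succ n ih =>
    intro l hl hv
    rw [loopB]
    by_cases hc : (onePass l).2 = true
    · simp only [hc, dif_pos]
      have hlt := (onePass_length l).2 hc
      have hv' : ∀ d ∈ (onePass l).1, d ∈ (["NORTH", "SOUTH", "EAST", "WEST"] : List String) :=
        fun d hd => hv d (onePass_mem d hd)
      obtain ⟨h1, h2, h3⟩ := ih (onePass l).1 (by omega) hv'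
      refine ⟨?_, h2, h3⟩
      rw [h1, fold_onePass l [] hv (by simp [Reduced])]
    · simp only [hc, dif_neg, Bool.false_eq_true, not_false_eq_true]
      obtain ⟨h1, h2⟩ := onePass_fix ((Bool.not_eq_true _).mp hc)
      rw [h1]
      exact ⟨rfl, hv, h2⟩

-- ===== VERDICT (by name: the statement is the Claim_ definition above) =====
theorem dirReduc_spec : Claim_equal_dirReduc := by
  intro arr _ hpre
  unfold Spec_dirReduc dirReduc dirReduc_alt
  obtain ⟨h1, h2, h3⟩ := loopB_spec arr.length arr le_rfl hpre
  rw [← h1, fold_reduced (loopB arr) [] h2 h3 (by intro x hx; simp at hx)]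
  simp
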